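-- pv_equiv track=rewrite | github.com/fcunhaneto-teste/pycripto | codifica.py | roteia
-- ===== SOURCE A (Python) =====
-- def roteia(rt, lista, lista_num):
--     count = 0
--     convertido = dict()
--
--     for c in lista:
--         num = lista_num[c] + rt
--
--         if num > (len(lista) - 1):
--             num = count
--             count += 1
--
--         convertido[c] = num
--
--     return convertido
-- ===== SOURCE B (Python) =====
-- def roteia(rt, lista, lista_num):
--     limit = len(lista) - 1
--     shifted = [lista_num[c] + rt for c in lista]
--     flags = [v > limit for v in shifted]
--     convertido = {}
--     for i, c in enumerate(lista):
--         convertido[c] = flags[:i].count(True) if flags[i] else shifted[i]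
--     return convertido
-- ===== Notes on version B (the rewrite author's own statement) =====
-- stated objective: alternative
-- what changed: Replaces A's single loop with an inline mutable overflow counter by a two-pass decomposition: first precompute the shifted values and overflow flags, then build the dict via enumerate, where each overflow entry's value is the closed-form prefix count flags[:i].count(True) instead of a running counter.
import Mathlib
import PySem

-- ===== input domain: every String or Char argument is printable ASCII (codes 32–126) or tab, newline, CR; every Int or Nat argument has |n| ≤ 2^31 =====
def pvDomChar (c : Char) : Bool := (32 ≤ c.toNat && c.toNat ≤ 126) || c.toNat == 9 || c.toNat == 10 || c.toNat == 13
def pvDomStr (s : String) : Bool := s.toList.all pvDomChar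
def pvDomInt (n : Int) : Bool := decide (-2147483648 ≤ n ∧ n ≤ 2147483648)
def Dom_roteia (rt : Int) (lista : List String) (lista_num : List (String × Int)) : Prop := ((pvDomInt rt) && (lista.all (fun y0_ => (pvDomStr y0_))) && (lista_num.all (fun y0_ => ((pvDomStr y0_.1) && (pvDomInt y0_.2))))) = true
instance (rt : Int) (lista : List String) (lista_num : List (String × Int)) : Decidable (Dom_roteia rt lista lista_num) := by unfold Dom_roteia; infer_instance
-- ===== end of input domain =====

-- B replaces A's running overflow counter with precomputed flags and a closed-form
-- prefix count per position (alternative decomposition, same results).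

-- ===== PORT A =====
def roteia (rt : Int) (lista : List String) (lista_num : List (String × Int)) : List (String × Int) :=
  (lista.foldl
    (fun (st : Int × PySem.Dict String Int) c =>
      let num := (PySem.Dict.ofList lista_num).getD c 0 + rt
      if num > (lista.length : Int) - 1 then (st.1 + 1, st.2.insert c st.1)
      else (st.1, st.2.insert c num))
    (0, PySem.Dict.empty)).2.items

-- ===== PORT B =====
def roteia_alt (rt : Int) (lista : List String) (lista_num : List (String × Int)) : List (String × Int) :=
  let limit : Int := (lista.length : Int) - 1
  let shifted := lista.map (fun c => (PySem.Dict.ofList lista_num).getD c 0 + rt)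
  let flags := shifted.map (fun v => decide (v > limit))
  ((PySem.List.enumerate lista).foldl
    (fun (d : PySem.Dict String Int) p =>
      d.insert p.2
        (if PySem.List.pyGetD flags p.1 false
         then ((PySem.List.slice flags none (some p.1)).count true : Int)
         else PySem.List.pyGetD shifted p.1 0))
    PySem.Dict.empty).items

-- ===== PRECONDITION & SPEC =====
-- Pre_ excludes exactly the inputs where some element of lista is not a key of
-- lista_num, on which Python A raises KeyError (B raises there too).
def Pre_roteia (rt : Int) (lista : List String) (lista_num : List (String × Int)) : Prop :=
  ∀ c ∈ lista, (PySem.Dict.ofList lista_num).contains c = true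
instance (rt : Int) (lista : List String) (lista_num : List (String × Int)) : Decidable (Pre_roteia rt lista lista_num) := by unfold Pre_roteia; infer_instance
def pvWitness_roteia : Int × List String × (List (String × Int)) := (1, ["a", "b"], [("a", 0), ("b", 1)])

def Spec_roteia (rt : Int) (lista : List String) (lista_num : List (String × Int)) (out : List (String × Int)) : Prop := out = roteia_alt rt lista lista_num
instance (rt : Int) (lista : List String) (lista_num : List (String × Int)) (out : List (String × Int)) : Decidable (Spec_roteia rt lista lista_num out) := by unfold Spec_roteia; infer_instance

-- ===== CLAIM (what is proved, stated in full; the proofs are below) =====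
def Claim_equal_roteia : Prop := ∀ (rt : Int) (lista : List String) (lista_num : List (String × Int)), Dom_roteia rt lista lista_num → Pre_roteia rt lista lista_num → Spec_roteia rt lista lista_num (roteia rt lista lista_num)

-- ===== LEMMAS AND PROOFS =====

-- The loop invariant: running A's loop over the suffix lista.drop k with counter
-- count = number of overflow flags among the first k positions produces the same
-- dict as B's enumerate-fold over that suffix starting at index k.
theorem roteia_main (rt : Int) (lista : List String) (lista_num : List (String × Int))
    (cs : List String) (k : Nat) (count : Int) (d : PySem.Dict String Int)
    (hcs : lista.drop k = cs)
    (hcount : count = ((((lista.map (fun c => (PySem.Dict.ofList lista_num).getD c 0 + rt)).map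
        (fun v => decide (v > (lista.length : Int) - 1))).take k).count true : Int)) :
    (cs.foldl
      (fun (st : Int × PySem.Dict String Int) c =>
        let num := (PySem.Dict.ofList lista_num).getD c 0 + rt
        if num > (lista.length : Int) - 1 then (st.1 + 1, st.2.insert c st.1)
        else (st.1, st.2.insert c num))
      (count, d)).2
    = (PySem.List.enumerate cs (k : Int)).foldl
        (fun (d : PySem.Dict String Int) p =>
          d.insert p.2
            (if PySem.List.pyGetD ((lista.map (fun c => (PySem.Dict.ofList lista_num).getD c 0 + rt)).map
                  (fun v => decide (v > (lista.length : Int) - 1))) p.1 false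
             then ((PySem.List.slice ((lista.map (fun c => (PySem.Dict.ofList lista_num).getD c 0 + rt)).map
                  (fun v => decide (v > (lista.length : Int) - 1))) none (some p.1)).count true : Int)
             else PySem.List.pyGetD (lista.map (fun c => (PySem.Dict.ofList lista_num).getD c 0 + rt)) p.1 0))
        d := by
  induction cs generalizing k count d with
  | nil => simp [PySem.List.enumerate_nil]
  | cons c cs ih =>
    have hk : k < lista.length := by
      by_contra h
      rw [List.drop_eq_nil_iff.mpr (by omega)] at hcs
      simp at hcs
    have hck : lista[k] = c := by
      have h0 := congrArg (fun l => l[0]?) hcs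
      have : lista[k]? = some c := by simpa [List.getElem?_drop] using h0
      simpa [List.getElem?_eq_getElem hk] using this
    have hdrop : lista.drop (k + 1) = cs := by
      have h1 : lista.drop (k + 1) = (lista.drop k).drop 1 := by
        rw [List.drop_drop]
      rw [h1, hcs]
      rfl
    have hflag : PySem.List.pyGetD
        ((lista.map (fun c => (PySem.Dict.ofList lista_num).getD c 0 + rt)).map
          (fun v => decide (v > (lista.length : Int) - 1))) ((k : Nat) : Int) false
        = decide ((PySem.Dict.ofList lista_num).getD c 0 + rt > (lista.length : Int) - 1) := by
      simp [List.getD_eq_getElem?_getD, List.getElem?_map, List.getElem?_eq_getElem hk, hck]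
    have hshift : PySem.List.pyGetD
        (lista.map (fun c => (PySem.Dict.ofList lista_num).getD c 0 + rt)) ((k : Nat) : Int) 0
        = (PySem.Dict.ofList lista_num).getD c 0 + rt := by
      simp [List.getD_eq_getElem?_getD, List.getElem?_map, List.getElem?_eq_getElem hk, hck]
    have hslice : PySem.List.slice
        ((lista.map (fun c => (PySem.Dict.ofList lista_num).getD c 0 + rt)).map
          (fun v => decide (v > (lista.length : Int) - 1))) none (some ((k : Nat) : Int))
        = ((lista.map (fun c => (PySem.Dict.ofList lista_num).getD c 0 + rt)).map
          (fun v => decide (v > (lista.length : Int) - 1))).take k :=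
      PySem.List.slice_to_natCast ..
    have htake : (((lista.map (fun c => (PySem.Dict.ofList lista_num).getD c 0 + rt)).map
          (fun v => decide (v > (lista.length : Int) - 1))).take (k + 1)).count true
        = (((lista.map (fun c => (PySem.Dict.ofList lista_num).getD c 0 + rt)).map
          (fun v => decide (v > (lista.length : Int) - 1))).take k).count true
          + (if (PySem.Dict.ofList lista_num).getD c 0 + rt > (lista.length : Int) - 1 then 1 else 0) := by
      rw [List.take_add_one]
      simp [List.getElem?_map, List.getElem?_eq_getElem hk, hck, List.count_append, List.count_singleton]

    rw [PySem.List.enumerate_cons]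
    simp only [List.foldl_cons, hflag, hshift, hslice]
    by_cases hov : (PySem.Dict.ofList lista_num).getD c 0 + rt > (lista.length : Int) - 1
    · simp only [hov, decide_true, if_true]
      have : ((k : Int) + 1) = ((k + 1 : Nat) : Int) := by push_cast; ring
      rw [this]
      rw [hcount]
      exact ih (k + 1) _ _ hdrop (by rw [htake]; simp [hov])
    · simp only [hov, decide_false, if_false]
      have : ((k : Int) + 1) = ((k + 1 : Nat) : Int) := by push_cast; ring
      rw [this]
      exact ih (k + 1) _ _ hdrop (by rw [htake, hcount]; simp [hov])

-- ===== VERDICT (by name: the statement is the Claim_ definition above) =====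
theorem roteia_spec : Claim_equal_roteia := by
  intro rt lista lista_num _ _
  unfold Spec_roteia roteia roteia_alt
  simp only []
  congr 1
  have h := roteia_main rt lista lista_num lista 0 0 PySem.Dict.empty (List.drop_zero) (by simp)
  simpa using h
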